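-- pv_equiv track=rewrite | github.com/chenIshi/game-distance2-coloring | src/game_coloring/graphs.py | build_square_graph
-- ===== SOURCE A (Python) =====
-- Graph = tuple[frozenset[int], ...]
--
-- def normalize_graph(adjacency: list[set[int]]) -> Graph:
--     return tuple(frozenset(neighbors) for neighbors in adjacency)
--
-- def build_square_graph(graph: Graph) -> Graph:
--     square_adjacency = [set() for _ in range(len(graph))]
--
--     for vertex, neighbors in enumerate(graph):
--         distance_two_neighbors = set(neighbors)
--         for neighbor in neighbors:
--             distance_two_neighbors.update(graph[neighbor])
--
--         distance_two_neighbors.discard(vertex)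
--         square_adjacency[vertex] = distance_two_neighbors
--
--     return normalize_graph(square_adjacency)
-- ===== SOURCE B (Python) =====
-- def build_square_graph(graph):
--     n = len(graph)
--     square = [set(neighbors) for neighbors in graph]
--     pairs = [(u, v) for v, neighbors in enumerate(graph) for u in neighbors]
--     predecessors = {}
--     for u, v in pairs:
--         predecessors.setdefault(u, []).append(v)
--     for u, vs in predecessors.items():
--         targets = graph[u]
--         for v in vs:
--             square[v].update(targets)
--     for v in range(n):
--         square[v].discard(v)
--     return tuple(frozenset(s) for s in square)
-- ===== Notes on version B (the rewrite author's own statement) =====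
-- stated objective: alternative
-- what changed: Instead of gathering, per vertex, the union of its neighbors' rows, B builds a reverse predecessor index once and pushes each middle vertex's row to all of its predecessors in one pass over the index, then discards each vertex from its own row.
import Mathlib
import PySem

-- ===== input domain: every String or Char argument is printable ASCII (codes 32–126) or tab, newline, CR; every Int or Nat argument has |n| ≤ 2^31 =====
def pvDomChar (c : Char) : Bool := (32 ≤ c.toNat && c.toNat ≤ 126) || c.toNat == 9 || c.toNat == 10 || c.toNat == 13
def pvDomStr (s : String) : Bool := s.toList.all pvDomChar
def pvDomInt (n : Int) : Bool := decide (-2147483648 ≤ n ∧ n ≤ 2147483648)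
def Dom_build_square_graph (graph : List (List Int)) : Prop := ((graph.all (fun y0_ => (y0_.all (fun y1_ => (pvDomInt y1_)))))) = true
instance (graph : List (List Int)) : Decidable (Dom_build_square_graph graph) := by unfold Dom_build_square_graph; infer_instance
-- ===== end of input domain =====

-- B builds the graph square via a reverse predecessor index (push each middle vertex's row to
-- its predecessors) instead of A's per-vertex gathering of the neighbors' rows; return-value
-- equivalence only (neither program mutates its argument). A frozenset has no observable
-- element order, so both ports represent each returned frozenset canonically as the sorted
-- list of its distinct elements.

-- ===== PORT A =====
-- frozenset(s) of a Set: canonical sorted representation (a frozenset's order is not observable)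
def pvFrozen (s : PySem.Set Int) : List Int := PySem.List.sorted s (fun x => x) false

-- normalize_graph(adjacency)
def pvNormalizeGraph (adjacency : List (PySem.Set Int)) : List (List Int) :=
  adjacency.map pvFrozen

def build_square_graph (graph : List (List Int)) : List (List Int) :=
  -- square_adjacency = [set() for _ in range(len(graph))]
  let square0 : List (PySem.Set Int) :=
    (PySem.List.pyRange 0 (graph.length : Int) 1).map (fun _ => (PySem.Set.empty : PySem.Set Int))
  -- for vertex, neighbors in enumerate(graph): ...
  let square := (PySem.List.enumerate graph).foldl (fun sq vn =>
    let vertex := vn.1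
    let neighbors := vn.2
    -- distance_two_neighbors = set(neighbors); for neighbor in neighbors: update(graph[neighbor])
    let d2 := neighbors.foldl
      (fun acc u => PySem.Set.update acc (PySem.List.pyGetD graph u []))
      (PySem.Set.ofList neighbors)
    -- distance_two_neighbors.discard(vertex); square_adjacency[vertex] = distance_two_neighbors
    PySem.List.pySetD sq vertex (PySem.Set.discard d2 vertex)) square0
  pvNormalizeGraph square

-- ===== PORT B =====
def build_square_graph_alt (graph : List (List Int)) : List (List Int) :=
  let n := graph.length
  -- square = [set(neighbors) for neighbors in graph]
  let square : List (PySem.Set Int) := graph.map (fun neighbors => PySem.Set.ofList neighbors)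
  -- pairs = [(u, v) for v, neighbors in enumerate(graph) for u in neighbors]
  let pairs : List (Int × Int) :=
    (PySem.List.enumerate graph).flatMap (fun vn => vn.2.map (fun u => (u, vn.1)))
  -- predecessors = {}; for u, v in pairs: predecessors.setdefault(u, []).append(v)
  let predecessors : PySem.Dict Int (List Int) :=
    pairs.foldl (fun d p => d.modify p.1 [] (fun l => l ++ [p.2])) PySem.Dict.empty
  -- for u, vs in predecessors.items(): targets = graph[u]; for v in vs: square[v].update(targets)
  let square := predecessors.items.foldl (fun sq uvs =>
    let targets := PySem.List.pyGetD graph uvs.1 []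
    uvs.2.foldl
      (fun sq v => PySem.List.pySetD sq v (PySem.Set.update (PySem.List.pyGetD sq v []) targets))
      sq) square
  -- for v in range(n): square[v].discard(v)
  let square := (PySem.List.pyRange 0 (n : Int) 1).foldl
    (fun sq v => PySem.List.pySetD sq v (PySem.Set.discard (PySem.List.pyGetD sq v []) v)) square
  -- tuple(frozenset(s) for s in square)
  square.map (fun s => PySem.List.sorted s (fun x => x) false)

-- ===== PRECONDITION & SPEC =====
-- A indexes graph[neighbor] for every listed neighbor; outside this range Python raises IndexError.
def Pre_build_square_graph (graph : List (List Int)) : Prop :=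
  ∀ row ∈ graph, ∀ u ∈ row, PySem.Raise.InRange graph.length u
instance (graph : List (List Int)) : Decidable (Pre_build_square_graph graph) := by
  unfold Pre_build_square_graph; infer_instance

def pvWitness_build_square_graph : List (List Int) := [[1], [0, -2]]

def Spec_build_square_graph (graph : List (List Int)) (out : List (List Int)) : Prop := out = build_square_graph_alt graph
instance (graph : List (List Int)) (out : List (List Int)) : Decidable (Spec_build_square_graph graph out) := by unfold Spec_build_square_graph; infer_instance

-- ===== CLAIM (what is proved, stated in full; the proofs are below) =====
def Claim_equal_build_square_graph : Prop := ∀ (graph : List (List Int)), Dom_build_square_graph graph → Pre_build_square_graph graph → Spec_build_square_graph graph (build_square_graph graph)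

-- ===== LEMMAS AND PROOFS =====

lemma mem_foldl_update (graph : List (List Int)) (x : Int) :
    ∀ (l : List Int) (s : PySem.Set Int),
      (x ∈ l.foldl (fun acc u => PySem.Set.update acc (PySem.List.pyGetD graph u [])) s ↔
        x ∈ s ∨ ∃ u ∈ l, x ∈ PySem.List.pyGetD graph u []) := by
  intro l
  induction l with
  | nil => simp
  | cons a l ih =>
      intro s
      simp only [List.foldl_cons, ih, PySem.Set.mem_update, List.mem_cons]
      constructor
      · rintro ((h | h) | ⟨u, hu, hx⟩)
        · exact Or.inl h
        · exact Or.inr ⟨a, Or.inl rfl, h⟩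
        · exact Or.inr ⟨u, Or.inr hu, hx⟩
      · rintro (h | ⟨u, (rfl | hu), hx⟩)
        · exact Or.inl (Or.inl h)
        · exact Or.inl (Or.inr hx)
        · exact Or.inr ⟨u, hu, hx⟩

lemma nodup_foldl_update (graph : List (List Int)) :
    ∀ (l : List Int) (s : PySem.Set Int), s.Nodup →
      (l.foldl (fun acc u => PySem.Set.update acc (PySem.List.pyGetD graph u [])) s).Nodup := by
  intro l
  induction l with
  | nil => intro s hs; simpa using hs
  | cons a l ih => intro s hs; exact ih _ (PySem.Set.nodup_update _ _ hs)

-- the assignment loop of A: sets index `vertex` of the array, in order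
lemma foldl_setD_enumerate (F : Int → List Int → PySem.Set Int) :
    ∀ (gs : List (List Int)) (pre rest : List (PySem.Set Int)), rest.length = gs.length →
      (PySem.List.enumerate gs (pre.length : Int)).foldl
          (fun sq vn => PySem.List.pySetD sq vn.1 (F vn.1 vn.2)) (pre ++ rest)
        = pre ++ (PySem.List.enumerate gs (pre.length : Int)).map (fun vn => F vn.1 vn.2) := by
  intro gs
  induction gs with
  | nil =>
      intro pre rest h
      have hr : rest = [] := List.length_eq_zero_iff.mp (by simpa using h)
      subst hr
      simp
  | cons g gs ih =>
      intro pre rest h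
      cases rest with
      | nil => simp at h
      | cons r rs =>
          rw [PySem.List.enumerate_cons]
          simp only [List.foldl_cons, List.map_cons]
          have hset : PySem.List.pySetD (pre ++ r :: rs) ((pre.length : Int)) (F (pre.length : Int) g)
              = pre ++ F (pre.length : Int) g :: rs := by
            rw [PySem.List.pySetD_natCast, List.set_append]
            simp
          rw [hset]
          have hlen : ((pre ++ [F (pre.length : Int) g]).length : Int) = (pre.length : Int) + 1 := by
            simp
          have h' : rs.length = gs.length := by simpa using h
          have := ih (pre ++ [F (pre.length : Int) g]) rs h'
          rw [hlen] at this
          rw [List.append_cons pre _ rs, this]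
          simp

-- a fold writing sq[v] := f v sq[v] for each v in a list of in-range indices (f idempotent per index)
lemma foldl_setD_map (f : Int → PySem.Set Int → PySem.Set Int)
    (hf : ∀ v s, f v (f v s) = f v s) :
    ∀ (vs : List Int) (sq : List (PySem.Set Int)),
      (∀ v ∈ vs, 0 ≤ v ∧ v < (sq.length : Int)) → ∀ (k : Nat),
      (vs.foldl (fun sq v => PySem.List.pySetD sq v (f v (PySem.List.pyGetD sq v []))) sq)[k]?
        = sq[k]?.map (fun s => if (k : Int) ∈ vs then f (k : Int) s else s) := by
  intro vs
  induction vs with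
  | nil =>
      intro sq _ k
      simp
  | cons v vs ih =>
      intro sq hv k
      obtain ⟨hv0, hvlen⟩ := hv v List.mem_cons_self
      obtain ⟨m, rfl⟩ : ∃ m : ℕ, v = (m : Int) := ⟨v.toNat, (Int.toNat_of_nonneg hv0).symm⟩
      have hmlt : m < sq.length := by exact_mod_cast hvlen
      have hget : PySem.List.pyGetD sq ((m : ℕ) : Int) [] = sq[m] := by
        rw [PySem.List.pyGetD_natCast, List.getD_eq_getElem sq [] hmlt]
      rw [List.foldl_cons, hget, PySem.List.pySetD_natCast]
      have hv' : ∀ w ∈ vs, 0 ≤ w ∧ w < ((sq.set m (f ((m : ℕ) : Int) sq[m])).length : Int) := by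
        intro w hw
        simpa using hv w (List.mem_cons_of_mem _ hw)
      rw [ih _ hv' k, List.getElem?_set]
      by_cases hkm : m = k
      · subst hkm
        rw [if_pos rfl, if_pos hmlt, List.getElem?_eq_getElem hmlt]
        simp only [Option.map_some]
        have hhead : ((m : ℕ) : Int) ∈ ((m : ℕ) : Int) :: vs := List.mem_cons_self
        rw [if_pos hhead]
        by_cases hkvs : ((m : ℕ) : Int) ∈ vs
        · rw [if_pos hkvs, hf]
        · rw [if_neg hkvs]
      · rw [if_neg hkm]
        have hmem : (((k : ℕ) : Int) ∈ ((m : ℕ) : Int) :: vs) ↔ (((k : ℕ) : Int) ∈ vs) := by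
          simp only [List.mem_cons]
          constructor
          · rintro (hkm' | h)
            · exact absurd (by exact_mod_cast hkm'.symm) hkm
            · exact h
          · exact Or.inr
        simp only [hmem]

lemma length_foldl_setD (g : Int → PySem.Set Int → PySem.Set Int) :
    ∀ (vs : List Int) (sq : List (PySem.Set Int)),
      (vs.foldl (fun sq v => PySem.List.pySetD sq v (g v (PySem.List.pyGetD sq v []))) sq).length
        = sq.length := by
  intro vs
  induction vs with
  | nil => intro sq; rfl
  | cons v vs ih => intro sq; rw [List.foldl_cons, ih, PySem.List.length_pySetD]

lemma update_update_self (s : PySem.Set Int) (T : List Int) :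
    (s.update T).update T = s.update T := by
  rw [PySem.Set.update_eq_append_filter (s.update T) T]
  have h : List.filter (fun y => !(s.update T).contains y) (PySem.Set.ofList T) = [] := by
    rw [List.filter_eq_nil_iff]
    intro y hy
    have hyT : y ∈ T := (PySem.Set.mem_ofList T y).mp hy
    simp
    intro _
    exact hyT
  rw [h, List.append_nil]

lemma discard_discard_self (s : PySem.Set Int) (x : Int) :
    (s.discard x).discard x = s.discard x := by
  simp [PySem.Set.discard]

-- the items loop of B, characterised index-wise
lemma outer_get (graph : List (List Int)) :
    ∀ (L : List (Int × List Int)) (sq : List (PySem.Set Int)),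
      (∀ p ∈ L, ∀ v ∈ p.2, 0 ≤ v ∧ v < (sq.length : Int)) → ∀ (k : Nat),
      (L.foldl (fun sq uvs =>
          uvs.2.foldl (fun sq v =>
            PySem.List.pySetD sq v
              (PySem.Set.update (PySem.List.pyGetD sq v []) (PySem.List.pyGetD graph uvs.1 []))) sq)
        sq)[k]?
        = sq[k]?.map (fun s => L.foldl
            (fun s p => if (k : Int) ∈ p.2 then PySem.Set.update s (PySem.List.pyGetD graph p.1 []) else s) s) := by
  intro L
  induction L with
  | nil =>
      intro sq _ k
      simp
  | cons p L ih =>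
      intro sq hL k
      rw [List.foldl_cons]
      have hlen := length_foldl_setD (fun _ s => PySem.Set.update s (PySem.List.pyGetD graph p.1 [])) p.2 sq
      have hinner := foldl_setD_map (fun _ s => PySem.Set.update s (PySem.List.pyGetD graph p.1 []))
        (fun _ s => update_update_self s _) p.2 sq (hL p List.mem_cons_self)
      have hL' : ∀ q ∈ L, ∀ v ∈ q.2, 0 ≤ v ∧ v <
          ((p.2.foldl (fun sq v =>
            PySem.List.pySetD sq v
              (PySem.Set.update (PySem.List.pyGetD sq v []) (PySem.List.pyGetD graph p.1 []))) sq).length : Int) := by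
        intro q hq v hv
        rw [hlen]
        exact hL q (List.mem_cons_of_mem _ hq) v hv
      rw [ih _ hL' k, hinner k]
      cases sq[k]? <;> simp

lemma length_outer (graph : List (List Int)) :
    ∀ (L : List (Int × List Int)) (sq : List (PySem.Set Int)),
      (L.foldl (fun sq uvs =>
          uvs.2.foldl (fun sq v =>
            PySem.List.pySetD sq v
              (PySem.Set.update (PySem.List.pyGetD sq v []) (PySem.List.pyGetD graph uvs.1 []))) sq)
        sq).length = sq.length := by
  intro L
  induction L with
  | nil => intro sq; rfl
  | cons p L ih =>
      intro sq
      rw [List.foldl_cons, ih,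
        length_foldl_setD (fun _ s => PySem.Set.update s (PySem.List.pyGetD graph p.1 [])) p.2 sq]

lemma mem_foldl_condupdate (graph : List (List Int)) (k : Nat) (x : Int) :
    ∀ (L : List (Int × List Int)) (s : PySem.Set Int),
      (x ∈ L.foldl (fun s p => if (k : Int) ∈ p.2 then PySem.Set.update s (PySem.List.pyGetD graph p.1 []) else s) s ↔
        x ∈ s ∨ ∃ p ∈ L, (k : Int) ∈ p.2 ∧ x ∈ PySem.List.pyGetD graph p.1 []) := by
  intro L
  induction L with
  | nil => simp
  | cons p L ih =>
      intro s
      by_cases hp : (k : Int) ∈ p.2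
      · simp only [List.foldl_cons, hp, if_true, ih, PySem.Set.mem_update, List.mem_cons]
        constructor
        · rintro ((h | h) | ⟨q, hq, hk, hx⟩)
          · exact Or.inl h
          · exact Or.inr ⟨p, Or.inl rfl, hp, h⟩
          · exact Or.inr ⟨q, Or.inr hq, hk, hx⟩
        · rintro (h | ⟨q, (rfl | hq), hk, hx⟩)
          · exact Or.inl (Or.inl h)
          · exact Or.inl (Or.inr hx)
          · exact Or.inr ⟨q, hq, hk, hx⟩
      · simp only [List.foldl_cons, hp, if_false, ih, List.mem_cons]
        constructor
        · rintro (h | ⟨q, hq, hk, hx⟩)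
          · exact Or.inl h
          · exact Or.inr ⟨q, Or.inr hq, hk, hx⟩
        · rintro (h | ⟨q, (rfl | hq), hk, hx⟩)
          · exact Or.inl h
          · exact absurd hk hp
          · exact Or.inr ⟨q, hq, hk, hx⟩

lemma nodup_foldl_condupdate (graph : List (List Int)) (k : Nat) :
    ∀ (L : List (Int × List Int)) (s : PySem.Set Int), s.Nodup →
      (L.foldl (fun s p => if (k : Int) ∈ p.2 then PySem.Set.update s (PySem.List.pyGetD graph p.1 []) else s) s).Nodup := by
  intro L
  induction L with
  | nil => intro s hs; simpa using hs
  | cons p L ih =>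
      intro s hs
      rw [List.foldl_cons]
      by_cases hp : (k : Int) ∈ p.2
      · rw [if_pos hp]; exact ih _ (PySem.Set.nodup_update _ _ hs)
      · rw [if_neg hp]; exact ih _ hs

lemma sorted_congr_perm {s t : List Int} (hs : s.Nodup) (ht : t.Nodup) (h : ∀ x, x ∈ s ↔ x ∈ t) :
    PySem.List.sorted s (fun x => x) false = PySem.List.sorted t (fun x => x) false := by
  have hperm : (PySem.List.sorted s (fun x => x) false).Perm t := by
    refine (PySem.List.sorted_perm s (fun x => x) false).trans ?_
    exact (List.perm_ext_iff_of_nodup hs ht).mpr h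
  have hle : (PySem.List.sorted s (fun x => x) false).Pairwise (fun a b => a ≤ b) :=
    PySem.List.sorted_pairwise s (fun x => x)
  have hnd : (PySem.List.sorted s (fun x => x) false).Nodup :=
    (PySem.List.sorted_perm s (fun x => x) false).nodup_iff.mpr hs
  have hlt : (PySem.List.sorted s (fun x => x) false).Pairwise (fun a b => a < b) :=
    (hle.and hnd).imp (fun hab => lt_of_le_of_ne hab.1 hab.2)
  exact (PySem.List.sorted_eq_of_perm_of_pairwise_lt t _ (fun x => x) hperm hlt).symm

-- proof-only abbreviations for the two programs' intermediate objects
def ASet (graph : List (List Int)) (v : Int) (nv : List Int) : PySem.Set Int :=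
  PySem.Set.discard
    (nv.foldl (fun acc u => PySem.Set.update acc (PySem.List.pyGetD graph u []))
      (PySem.Set.ofList nv)) v

def BPairs (graph : List (List Int)) : List (Int × Int) :=
  (PySem.List.enumerate graph).flatMap (fun vn => vn.2.map (fun u => (u, vn.1)))

def BPreds (graph : List (List Int)) : PySem.Dict Int (List Int) :=
  (BPairs graph).foldl (fun d p => d.modify p.1 [] (fun l => l ++ [p.2])) PySem.Dict.empty

lemma mem_BPairs (graph : List (List Int)) (q : Int × Int) :
    q ∈ BPairs graph ↔ ∃ (j : ℕ) (hj : j < graph.length), q.2 = (j : Int) ∧ q.1 ∈ graph[j] := by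
  unfold BPairs
  simp only [List.mem_flatMap, PySem.List.mem_enumerate_iff, List.mem_map]
  constructor
  · rintro ⟨vn, ⟨j, hj, rfl⟩, u, hu, rfl⟩
    exact ⟨j, hj, by simp, by simpa using hu⟩
  · rintro ⟨j, hj, hq2, hq1⟩
    refine ⟨((j : Int), graph[j]), ⟨j, hj, by simp⟩, q.1, hq1, ?_⟩
    rw [← hq2]

lemma nodup_keys_BPreds (graph : List (List Int)) : (BPreds graph).keys.Nodup :=
  PySem.Dict.nodup_keys_foldl_modify_key (BPairs graph) Prod.fst [] (fun _ p l => l ++ [p.2])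
    PySem.Dict.empty PySem.Dict.nodup_keys_empty

lemma getD_BPreds (graph : List (List Int)) (u : Int) :
    (BPreds graph).getD u [] = ((BPairs graph).filter (fun q => q.1 == u)).map (·.2) := by
  have := PySem.Dict.getD_foldl_modify_append (BPairs graph) (PySem.Dict.empty : PySem.Dict Int (List Int)) u
  simpa [PySem.Dict.getD_empty] using this

lemma keys_BPreds (graph : List (List Int)) :
    (BPreds graph).keys = PySem.Set.ofList ((BPairs graph).map (·.1)) := by
  have := PySem.Dict.keys_foldl_modify_key (BPairs graph) Prod.fst [] (fun _ p l => l ++ [p.2])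
    (PySem.Dict.empty : PySem.Dict Int (List Int))
  rw [PySem.Dict.keys_empty, PySem.Set.update_nil_left] at this
  exact this

lemma items_BPreds (graph : List (List Int)) :
    (BPreds graph).items = (BPreds graph).keys.map (fun u => (u, (BPreds graph).getD u [])) :=
  PySem.Dict.items_eq_map_keys (BPreds graph) (nodup_keys_BPreds graph) []

lemma items_vals_BPreds (graph : List (List Int)) :
    ∀ p ∈ (BPreds graph).items, ∀ v ∈ p.2, 0 ≤ v ∧ v < (graph.length : Int) := by
  intro p hp v hv
  rw [items_BPreds graph] at hp
  obtain ⟨u, _, rfl⟩ := List.mem_map.mp hp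
  rw [getD_BPreds graph u] at hv
  obtain ⟨q, hq, rfl⟩ := List.mem_map.mp hv
  obtain ⟨j, hj, hq2, _⟩ := (mem_BPairs graph q).mp (List.mem_of_mem_filter hq)
  rw [hq2]
  constructor
  · exact Int.natCast_nonneg j
  · exact_mod_cast hj

lemma key_BPreds (graph : List (List Int)) (k : ℕ) (hk : k < graph.length) (x : Int) :
    (∃ p ∈ (BPreds graph).items, (k : Int) ∈ p.2 ∧ x ∈ PySem.List.pyGetD graph p.1 []) ↔
      ∃ u ∈ graph[k], x ∈ PySem.List.pyGetD graph u [] := by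
  constructor
  · rintro ⟨p, hp, hkp, hx⟩
    rw [items_BPreds graph] at hp
    obtain ⟨u, _, rfl⟩ := List.mem_map.mp hp
    rw [getD_BPreds graph u] at hkp
    obtain ⟨q, hq, hq2⟩ := List.mem_map.mp hkp
    have hq1 : q.1 = u := by simpa using List.of_mem_filter hq
    obtain ⟨j, hj, hqj, hmem⟩ := (mem_BPairs graph q).mp (List.mem_of_mem_filter hq)
    have hjk : j = k := by
      have : ((j : ℕ) : Int) = ((k : ℕ) : Int) := by rw [← hqj, hq2]
      exact_mod_cast this
    subst hjk
    exact ⟨u, hq1 ▸ hmem, hx⟩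
  · rintro ⟨u, hu, hx⟩
    have hq : ((u, (k : Int)) : Int × Int) ∈ BPairs graph :=
      (mem_BPairs graph (u, (k : Int))).mpr ⟨k, hk, rfl, hu⟩
    have hukeys : u ∈ (BPreds graph).keys := by
      rw [keys_BPreds graph]
      exact (PySem.Set.mem_ofList _ _).mpr (List.mem_map.mpr ⟨(u, (k : Int)), hq, rfl⟩)
    refine ⟨(u, (BPreds graph).getD u []), ?_, ?_, hx⟩
    · rw [items_BPreds graph]
      exact List.mem_map.mpr ⟨u, hukeys, rfl⟩
    · rw [getD_BPreds graph u]
      exact List.mem_map.mpr ⟨(u, (k : Int)), List.mem_filter.mpr ⟨hq, by simp⟩, rfl⟩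

lemma main_eq (graph : List (List Int)) :
    build_square_graph graph = build_square_graph_alt graph := by
  -- A as a map over the enumerated rows
  have hrest : ((PySem.List.pyRange 0 (graph.length : Int) 1).map
      (fun _ => (PySem.Set.empty : PySem.Set Int))).length = graph.length := by
    simp [PySem.List.length_pyRange_one]
  have hApre : build_square_graph graph
      = (((PySem.List.enumerate graph ((([] : List (PySem.Set Int)).length : Int))).foldl
          (fun sq vn => PySem.List.pySetD sq vn.1 (ASet graph vn.1 vn.2))
          (([] : List (PySem.Set Int)) ++
            (PySem.List.pyRange 0 (graph.length : Int) 1).map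
              (fun _ => (PySem.Set.empty : PySem.Set Int)))).map pvFrozen) := rfl
  rw [foldl_setD_enumerate (ASet graph) graph [] _ hrest] at hApre
  simp only [List.length_nil, Nat.cast_zero, List.nil_append, List.map_map] at hApre
  -- B: the three stages
  have hBpre : build_square_graph_alt graph
      = ((PySem.List.pyRange 0 (graph.length : Int) 1).foldl
          (fun sq v => PySem.List.pySetD sq v
            (PySem.Set.discard (PySem.List.pyGetD sq v []) v))
          ((BPreds graph).items.foldl (fun sq uvs =>
            uvs.2.foldl (fun sq v =>
              PySem.List.pySetD sq v
                (PySem.Set.update (PySem.List.pyGetD sq v [])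
                  (PySem.List.pyGetD graph uvs.1 []))) sq)
            (graph.map (fun nv => PySem.Set.ofList nv)))).map
          (fun s => PySem.List.sorted s (fun x => x) false) := rfl
  -- lengths
  have hlen1 : (graph.map (fun nv => PySem.Set.ofList nv)).length = graph.length := by simp
  have hlen2 : ((BPreds graph).items.foldl (fun sq uvs =>
      uvs.2.foldl (fun sq v =>
        PySem.List.pySetD sq v
          (PySem.Set.update (PySem.List.pyGetD sq v [])
            (PySem.List.pyGetD graph uvs.1 []))) sq)
      (graph.map (fun nv => PySem.Set.ofList nv))).length = graph.length := by
    rw [length_outer graph, hlen1]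
  -- index-wise values of B's array after the items loop
  have hvals : ∀ p ∈ (BPreds graph).items, ∀ v ∈ p.2,
      0 ≤ v ∧ v < ((graph.map (fun nv => PySem.Set.ofList nv)).length : Int) := by
    rw [hlen1]; exact items_vals_BPreds graph
  have hsq2 : ∀ (k : ℕ), ((BPreds graph).items.foldl (fun sq uvs =>
      uvs.2.foldl (fun sq v =>
        PySem.List.pySetD sq v
          (PySem.Set.update (PySem.List.pyGetD sq v [])
            (PySem.List.pyGetD graph uvs.1 []))) sq)
      (graph.map (fun nv => PySem.Set.ofList nv)))[k]?
      = (graph.map (fun nv => PySem.Set.ofList nv))[k]?.map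
          (fun s => (BPreds graph).items.foldl
            (fun s p => if (k : Int) ∈ p.2 then PySem.Set.update s (PySem.List.pyGetD graph p.1 []) else s) s) :=
    outer_get graph (BPreds graph).items _ hvals
  rw [hApre, hBpre]
  -- compare index-wise
  apply List.ext_getElem?
  intro k
  rw [List.getElem?_map, List.getElem?_map]
  rw [foldl_setD_map (fun v s => PySem.Set.discard s v) (fun v s => discard_discard_self s v)
    (PySem.List.pyRange 0 (graph.length : Int) 1) _
    (by
      intro v hv
      rw [hlen2]
      exact (PySem.List.mem_pyRange_one).mp hv) k]
  rw [hsq2 k, PySem.List.getElem?_enumerate, List.getElem?_map]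
  by_cases hk : k < graph.length
  · rw [List.getElem?_eq_getElem hk]
    have hkin : (k : Int) ∈ PySem.List.pyRange 0 (graph.length : Int) 1 := by
      rw [PySem.List.mem_pyRange_one]
      constructor
      · exact Int.natCast_nonneg k
      · exact_mod_cast hk
    simp only [Option.map_some, if_pos hkin, zero_add]
    congr 1
    unfold pvFrozen ASet
    apply sorted_congr_perm
    · exact PySem.Set.nodup_discard _ _
        (nodup_foldl_update graph graph[k] _ (PySem.Set.nodup_ofList graph[k]))
    · exact PySem.Set.nodup_discard _ _
        (nodup_foldl_condupdate graph k (BPreds graph).items _ (PySem.Set.nodup_ofList graph[k]))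
    · intro x
      rw [PySem.Set.mem_discard, PySem.Set.mem_discard,
        mem_foldl_update graph x graph[k] (PySem.Set.ofList graph[k]),
        mem_foldl_condupdate graph k x (BPreds graph).items (PySem.Set.ofList graph[k]),
        PySem.Set.mem_ofList, key_BPreds graph k hk x]
  · have hk1 : graph[k]? = none := List.getElem?_eq_none (by omega)
    rw [hk1]
    rfl

-- ===== VERDICT (by name: the statement is the Claim_ definition above) =====
theorem build_square_graph_spec : Claim_equal_build_square_graph := by
  intro graph _ _
  unfold Spec_build_square_graph
  exact main_eq graph
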